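-- pv_equiv track=rewrite | github.com/mmatlin/assign-timeslots | main.py | fill_students
-- ===== SOURCE A (Python) =====
-- def fill_students(availability_table, student_ids, leader_schedules):  # , roster):
--     """Fills each potential schedule with students and returns the schedule with the least student conflicts,
--     as well as the list of students with conflicts.
--
--     Example final_schedule / tentative_schedule:
--
--     final_schedule = {
--         "time_name_1": {
--             "leader_ids": {leader_id_1},
--             "student_ids": {student_id_1, student_id_2, ...},
--         },
--         "time_name_2": {
--             "leader_ids": {leader_id_2},
--             "student_ids": {student_id_6, student_id_8, ...},
--         },
--     }
--     """
--     final_schedule = dict()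
--     final_conflict_student_ids = set(student_ids)
--
--     for leader_schedule in leader_schedules:
--         tentative_schedule = dict()
--         tentative_conflict_student_ids = set()
--
--         # Initialize each time slot in schedule to have a set for student IDs and a set for leader IDs
--         for slot in leader_schedule:
--             tentative_schedule[slot] = {
--                 "leader_ids": set([leader_schedule[slot]]),
--                 "student_ids": set(),
--             }
--
--         # TODO: Generate student_ids_with_slots from roster (easier for computing)
--         # student_ids_with_slots1 = [(ID, [slot for slot, available in info["availability"].items() if available]) for ID, info in roster.items() if ID in student_ids]
--         # student_ids_with_slots1.sort(key=lambda x: len(x[1]))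
--
--         student_ids_with_slots = []
--         for student_id in student_ids:
--             slots = []
--             for slot in leader_schedule:
--                 if student_id in availability_table[slot]["student_ids"]:
--                     slots.append(slot)
--             student_ids_with_slots.append((student_id, slots))
--         student_ids_with_slots.sort(key=lambda x: len(x[1]))
--
--         for student_id, slots in student_ids_with_slots:
--             if len(slots) == 0:
--                 tentative_conflict_student_ids.add(student_id)
--             elif len(slots) == 1:
--                 tentative_schedule[slots[0]]["student_ids"].add(student_id)
--             else:
--                 lowest_slot = min(
--                     slots, key=lambda slot: len(tentative_schedule[slot]["student_ids"])
--                 )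
--                 tentative_schedule[lowest_slot]["student_ids"].add(student_id)
--
--         if len(tentative_conflict_student_ids) < len(final_conflict_student_ids):
--             final_schedule = tentative_schedule
--             final_conflict_student_ids = tentative_conflict_student_ids
--
--     return final_schedule, final_conflict_student_ids
-- ===== SOURCE B (Python) =====
-- def fill_students(availability_table, student_ids, leader_schedules):
--     """Two-pass rewrite with a flat data structure: pass 1 only counts conflict
--     students per candidate schedule and picks the first strict-minimum winner;
--     pass 2 builds only the winning assignment as a flat slot->students mapping
--     (plus a conflict set) and assembles the nested schedule at the very end."""
--
--     def available_slots(sid, schedule):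
--         return [slot for slot in schedule
--                 if sid in availability_table[slot]["student_ids"]]
--
--     # Pass 1: count distinct conflict students per candidate; first strict winner.
--     best, threshold = None, len(set(student_ids))
--     for ls in leader_schedules:
--         stuck = {s for s in student_ids if not available_slots(s, ls)}
--         if len(stuck) < threshold:
--             best, threshold = ls, len(stuck)
--
--     if best is None:
--         return dict(), set(student_ids)
--
--     # Pass 2: greedy min-load assignment into a flat slot -> set-of-students map.
--     members = {slot: set() for slot in best}
--     conflicts = set()
--     for sid, slots in sorted(((s, available_slots(s, best)) for s in student_ids),
--                              key=lambda x: len(x[1])):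
--         if not slots:
--             conflicts.add(sid)
--         else:
--             members[min(slots, key=lambda sl: len(members[sl]))].add(sid)
--
--     # Assemble the nested schedule only once, for the winner.
--     schedule = {slot: {"leader_ids": {leader}, "student_ids": members[slot]}
--                 for slot, leader in best.items()}
--     return schedule, conflicts
-- ===== Notes on version B (the rewrite author's own statement) =====
-- stated objective: faster
-- what changed: Instead of fully building and sorting a nested tentative schedule for every candidate leader_schedule, B's first pass only counts the distinct conflict students per candidate and keeps the first strict improvement; only the winner is then built, and as a flat slot->students mapping whose nested {'leader_ids','student_ids'} shape is assembled once at the end.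
import Mathlib
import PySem

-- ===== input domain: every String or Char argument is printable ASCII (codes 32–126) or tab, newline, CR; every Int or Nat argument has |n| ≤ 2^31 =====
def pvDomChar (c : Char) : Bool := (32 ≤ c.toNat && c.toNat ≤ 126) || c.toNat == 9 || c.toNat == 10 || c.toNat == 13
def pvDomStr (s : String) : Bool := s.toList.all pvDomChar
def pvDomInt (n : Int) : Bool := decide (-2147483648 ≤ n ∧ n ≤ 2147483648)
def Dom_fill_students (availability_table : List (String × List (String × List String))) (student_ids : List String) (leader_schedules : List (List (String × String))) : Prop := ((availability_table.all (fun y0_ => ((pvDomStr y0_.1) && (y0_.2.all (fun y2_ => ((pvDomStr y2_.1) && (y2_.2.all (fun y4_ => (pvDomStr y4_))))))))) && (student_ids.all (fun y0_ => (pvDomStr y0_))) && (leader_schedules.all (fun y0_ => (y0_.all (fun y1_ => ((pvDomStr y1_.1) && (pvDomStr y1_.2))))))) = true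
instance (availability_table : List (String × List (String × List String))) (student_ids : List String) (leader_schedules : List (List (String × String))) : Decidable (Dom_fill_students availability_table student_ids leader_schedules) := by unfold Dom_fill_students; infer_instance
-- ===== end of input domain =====

-- B replaces A's build-and-sort of a full nested tentative schedule for EVERY candidate by a
-- counting-only first pass that picks the winner, then a flat slot→students assignment built
-- only for that winner and assembled into the nested shape at the end (objective: faster).

-- ===== PORT A =====
-- shared helpers: the input dicts converted to PySem.Dict, and the availability membership test
-- 'student_id in availability_table[slot]["student_ids"]' (total via getD; Pre_ excludes the KeyError inputs)
def pvAvail (availability_table : List (String × List (String × List String))) :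
    PySem.Dict String (PySem.Dict String (List String)) :=
  PySem.Dict.ofList (availability_table.map (fun p => (p.1, PySem.Dict.ofList p.2)))

def pvHas (atD : PySem.Dict String (PySem.Dict String (List String))) (slot sid : String) : Bool :=
  ((atD.getD slot PySem.Dict.empty).getD "student_ids" []).contains sid

-- A: slots list built by appending inside the loop over the schedule's slots
def pvSlotsA (atD : PySem.Dict String (PySem.Dict String (List String)))
    (lsD : PySem.Dict String String) (sid : String) : List String :=
  lsD.keys.foldl (fun slots slot => if pvHas atD slot sid then slots ++ [slot] else slots) []

-- tentative_schedule[slot] = {"leader_ids": {leader}, "student_ids": set()}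
def pvInitA (lsD : PySem.Dict String String) : PySem.Dict String (PySem.Dict String (List String)) :=
  lsD.items.foldl
    (fun sch p => sch.insert p.1
      (PySem.Dict.ofList [("leader_ids", PySem.Set.ofList [p.2]), ("student_ids", ([] : List String))]))
    PySem.Dict.empty

-- tentative_schedule[slot]["student_ids"].add(student_id)  (slot is always present)
def pvPlaceA (sch : PySem.Dict String (PySem.Dict String (List String))) (slot sid : String) :
    PySem.Dict String (PySem.Dict String (List String)) :=
  sch.modify slot PySem.Dict.empty (fun inner => inner.modify "student_ids" [] (fun s => PySem.Set.add s sid))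

def pvLoadA (sch : PySem.Dict String (PySem.Dict String (List String))) (slot : String) : Nat :=
  ((sch.getD slot PySem.Dict.empty).getD "student_ids" []).length

-- the body of A's assignment loop over the sorted (student, slots) pairs
def pvGreedyA (st : PySem.Dict String (PySem.Dict String (List String)) × PySem.Set String)
    (p : String × List String) :
    PySem.Dict String (PySem.Dict String (List String)) × PySem.Set String :=
  if p.2.length = 0 then (st.1, PySem.Set.add st.2 p.1)
  else if p.2.length = 1 then (pvPlaceA st.1 (p.2.headD "") p.1, st.2)
  else (pvPlaceA st.1 (PySem.List.minD p.2 (fun slot => pvLoadA st.1 slot) "") p.1, st.2)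

-- one iteration of A's outer loop: build the whole tentative schedule for this leader_schedule
def pvBuildA (atD : PySem.Dict String (PySem.Dict String (List String))) (student_ids : List String)
    (lsD : PySem.Dict String String) :
    PySem.Dict String (PySem.Dict String (List String)) × PySem.Set String :=
  let siws := student_ids.foldl (fun acc sid => acc ++ [(sid, pvSlotsA atD lsD sid)]) []
  (PySem.List.sorted siws (fun x => x.2.length) false).foldl pvGreedyA (pvInitA lsD, ([] : PySem.Set String))

def fill_students (availability_table : List (String × List (String × List String))) (student_ids : List String) (leader_schedules : List (List (String × String))) : (List (String × List (String × List String))) × List String :=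
  let atD := pvAvail availability_table
  let fin := leader_schedules.foldl
    (fun fin ls =>
      let t := pvBuildA atD student_ids (PySem.Dict.ofList ls)
      if t.2.length < fin.2.length then t else fin)
    ((PySem.Dict.empty : PySem.Dict String (PySem.Dict String (List String))), PySem.Set.ofList student_ids)
  (fin.1.items.map (fun p => (p.1, p.2.items)), fin.2)

-- ===== PORT B =====
-- available_slots(sid, schedule): the slots of the candidate schedule the student can attend
def pvSlotsB (atD : PySem.Dict String (PySem.Dict String (List String)))
    (lsD : PySem.Dict String String) (sid : String) : List String :=
  lsD.keys.filter (fun slot => pvHas atD slot sid)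

-- pass 1: size of the conflict set {s for s in student_ids if not available_slots(s, ls)}
def pvCount (atD : PySem.Dict String (PySem.Dict String (List String))) (student_ids : List String)
    (lsD : PySem.Dict String String) : Nat :=
  (PySem.Set.ofList (student_ids.filter (fun s => (pvSlotsB atD lsD s).isEmpty))).length

-- pass 2 (winner only): members = {slot: set() for slot in best}
def pvMembers0 (lsD : PySem.Dict String String) : PySem.Dict String (List String) :=
  lsD.keys.foldl (fun d sl => d.insert sl ([] : List String)) PySem.Dict.empty

-- the assignment loop, recursively over the sorted (student, slots) pairs:
-- conflicts on no slot, else members[min(slots, key=load)].add(sid)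
def pvAssign (st : PySem.Dict String (List String) × PySem.Set String) :
    List (String × List String) → PySem.Dict String (List String) × PySem.Set String
  | [] => st
  | (sid, []) :: rest => pvAssign (st.1, PySem.Set.add st.2 sid) rest
  | (sid, slots) :: rest =>
      pvAssign
        (st.1.modify (PySem.List.minD slots (fun sl => (st.1.getD sl []).length) "") []
          (fun m => PySem.Set.add m sid), st.2) rest

def pvRunB (atD : PySem.Dict String (PySem.Dict String (List String))) (student_ids : List String)
    (lsD : PySem.Dict String String) : PySem.Dict String (List String) × PySem.Set String :=
  pvAssign (pvMembers0 lsD, ([] : PySem.Set String))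
    (PySem.List.sorted (student_ids.map (fun s => (s, pvSlotsB atD lsD s))) (fun x => x.2.length) false)

def fill_students_alt (availability_table : List (String × List (String × List String))) (student_ids : List String) (leader_schedules : List (List (String × String))) : (List (String × List (String × List String))) × List String :=
  let atD := pvAvail availability_table
  let pick := leader_schedules.foldl
    (fun st ls =>
      let c := pvCount atD student_ids (PySem.Dict.ofList ls)
      if c < st.2 then (some (PySem.Dict.ofList ls), c) else st)
    ((none : Option (PySem.Dict String String)), (PySem.Set.ofList student_ids).length)
  match pick.1 with
  | none => ([], PySem.Set.ofList student_ids)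
  | some lsD =>
      let r := pvRunB atD student_ids lsD
      (lsD.items.map (fun p =>
          (p.1, [("leader_ids", PySem.Set.ofList [p.2]), ("student_ids", r.1.getD p.1 [])])),
       r.2)

-- ===== PRECONDITION & SPEC =====
-- Pre_ excludes exactly the inputs on which the Python A raises KeyError: some slot of some
-- leader_schedule is missing from availability_table (or its entry lacks "student_ids") while
-- student_ids is non-empty (with no students, A never indexes the table and returns normally).
def Pre_fill_students (availability_table : List (String × List (String × List String))) (student_ids : List String) (leader_schedules : List (List (String × String))) : Prop :=
  student_ids = [] ∨ ∀ ls ∈ leader_schedules, ∀ p ∈ ls,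
    (((pvAvail availability_table).get? p.1).elim false (fun d => d.contains "student_ids")) = true
instance (availability_table : List (String × List (String × List String))) (student_ids : List String) (leader_schedules : List (List (String × String))) : Decidable (Pre_fill_students availability_table student_ids leader_schedules) := by unfold Pre_fill_students; infer_instance
def pvWitness_fill_students : (List (String × List (String × List String))) × List String × (List (List (String × String))) :=
  ([("a", [("student_ids", ["u", "v"])]), ("b", [("student_ids", ["v"])])], ["u", "v"], [[("a", "L1")], [("a", "L1"), ("b", "L2")]])
def Spec_fill_students (availability_table : List (String × List (String × List String))) (student_ids : List String) (leader_schedules : List (List (String × String))) (out : (List (String × List (String × List String))) × List String) : Prop := out = fill_students_alt availability_table student_ids leader_schedules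
instance (availability_table : List (String × List (String × List String))) (student_ids : List String) (leader_schedules : List (List (String × String))) (out : (List (String × List (String × List String))) × List String) : Decidable (Spec_fill_students availability_table student_ids leader_schedules out) := by unfold Spec_fill_students; infer_instance

-- ===== CLAIM (what is proved, stated in full; the proofs are below) =====
def Claim_equal_fill_students : Prop := ∀ (availability_table : List (String × List (String × List String))) (student_ids : List String) (leader_schedules : List (List (String × String))), Dom_fill_students availability_table student_ids leader_schedules → Pre_fill_students availability_table student_ids leader_schedules → Spec_fill_students availability_table student_ids leader_schedules (fill_students availability_table student_ids leader_schedules)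

-- ===== LEMMAS AND PROOFS =====

-- the nested dict A maintains, as a function of the flat members dict B maintains
def pvVal (l : String) (s : List String) : PySem.Dict String (List String) :=
  PySem.Dict.ofList [("leader_ids", PySem.Set.ofList [l]), ("student_ids", s)]

def pvNest (lsD : PySem.Dict String String) (mem : PySem.Dict String (List String)) :
    PySem.Dict String (PySem.Dict String (List String)) :=
  PySem.Dict.mk (lsD.items.map (fun p => (p.1, pvVal p.2 (mem.getD p.1 []))))

theorem pvVal_mk (l : String) (s : List String) :
    pvVal l s = PySem.Dict.mk [("leader_ids", PySem.Set.ofList [l]), ("student_ids", s)] := rfl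

theorem pvVal_modify (l : String) (s : List String) (f : List String → List String) :
    (pvVal l s).modify "student_ids" [] f = pvVal l (f s) := by
  simp [pvVal_mk, PySem.Dict.modify, PySem.Dict.insert, PySem.Dict.contains, PySem.Dict.getD,
    PySem.Dict.get?]

theorem pvVal_getD (l : String) (s : List String) :
    (pvVal l s).getD "student_ids" [] = s := by
  simp [pvVal_mk, PySem.Dict.getD, PySem.Dict.get?]

theorem pvVal_items (l : String) (s : List String) :
    (pvVal l s).items = [("leader_ids", PySem.Set.ofList [l]), ("student_ids", s)] := rfl

-- generic association-list facts specific to the shapes of these two programs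
theorem pvFind?_keyed {β : Type} (l : List (String × β)) (h : (l.map Prod.fst).Nodup)
    (p : String × β) (hp : p ∈ l) : l.find? (fun q => q.1 == p.1) = some p := by
  induction l with
  | nil => simp at hp
  | cons a t ih =>
    simp only [List.map_cons, List.nodup_cons] at h
    rcases List.mem_cons.mp hp with rfl | hm
    · simp
    · rw [List.find?_cons_of_neg, ih h.2 hm]
      simp only [beq_iff_eq]
      intro he; exact h.1 (he ▸ List.mem_map_of_mem hm)

theorem pvGet?_mk_map {β γ : Type} (l : List (String × β)) (g : String × β → γ) (k : String) :
    (PySem.Dict.mk (l.map (fun p => (p.1, g p)))).get? k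
      = (l.find? (fun p => p.1 == k)).map g := by
  simp only [PySem.Dict.get?, List.find?_map]
  rw [Option.map_map]
  rfl

theorem pvKeys_mk_map {β γ : Type} (l : List (String × β)) (g : String × β → γ) :
    (PySem.Dict.mk (l.map (fun p => (p.1, g p)))).keys = l.map Prod.fst := by
  simp [PySem.Dict.keys]

theorem pvInsert_mk_map {β γ : Type} (l : List (String × β))
    (g : String × β → γ) (p0 : String × β) (hp0 : p0 ∈ l) (w : γ) :
    (PySem.Dict.mk (l.map (fun p => (p.1, g p)))).insert p0.1 w
      = PySem.Dict.mk (l.map (fun p => (p.1, if p.1 = p0.1 then w else g p))) := by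
  have hc : (PySem.Dict.mk (l.map (fun p => (p.1, g p)))).contains p0.1 = true := by
    rw [PySem.Dict.contains_iff_mem_keys, pvKeys_mk_map]
    exact List.mem_map_of_mem hp0
  simp only [PySem.Dict.insert, hc, if_pos, List.map_map]
  congr 1
  refine List.map_congr_left (fun p _ => ?_)
  by_cases he : p.1 = p0.1 <;> simp [he]

-- pvPlaceA on a nested state is a modify of the flat state
theorem pvPlace_nest (lsD : PySem.Dict String String) (h : lsD.keys.Nodup)
    (mem : PySem.Dict String (List String)) (sl sid : String) (hsl : sl ∈ lsD.keys) :
    pvPlaceA (pvNest lsD mem) sl sid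
      = pvNest lsD (mem.modify sl [] (fun s => PySem.Set.add s sid)) := by
  rcases List.mem_map.mp hsl with ⟨p0, hp0, rfl⟩
  have hget : (pvNest lsD mem).getD p0.1 PySem.Dict.empty = pvVal p0.2 (mem.getD p0.1 []) := by
    rw [PySem.Dict.getD, pvNest, pvGet?_mk_map, pvFind?_keyed lsD.items h p0 hp0]; rfl
  have hmod : ∀ (d : PySem.Dict String (PySem.Dict String (List String)))
      (f : PySem.Dict String (List String) → PySem.Dict String (List String)),
      d.modify p0.1 PySem.Dict.empty f = d.insert p0.1 (f (d.getD p0.1 PySem.Dict.empty)) :=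
    fun _ _ => rfl
  unfold pvPlaceA
  rw [hmod, hget, pvVal_modify]
  rw [show pvNest lsD mem
      = PySem.Dict.mk (lsD.items.map (fun p => (p.1, pvVal p.2 (mem.getD p.1 [])))) from rfl]
  rw [pvInsert_mk_map lsD.items _ p0 hp0]
  unfold pvNest
  congr 1
  refine List.map_congr_left (fun p hp => ?_)
  by_cases he : p.1 = p0.1
  · have hpp : p = p0 := List.inj_on_of_nodup_map h hp hp0 he
    subst hpp
    rw [if_pos rfl, PySem.Dict.getD_modify_self]
  · rw [if_neg he, PySem.Dict.getD_modify_of_ne _ _ _ he]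

theorem pvLoad_nest (lsD : PySem.Dict String String) (h : lsD.keys.Nodup)
    (mem : PySem.Dict String (List String)) (sl : String) (hsl : sl ∈ lsD.keys) :
    pvLoadA (pvNest lsD mem) sl = (mem.getD sl []).length := by
  rcases List.mem_map.mp hsl with ⟨p0, hp0, rfl⟩
  have hget : (pvNest lsD mem).getD p0.1 PySem.Dict.empty = pvVal p0.2 (mem.getD p0.1 []) := by
    rw [PySem.Dict.getD, pvNest, pvGet?_mk_map, pvFind?_keyed lsD.items h p0 hp0]; rfl
  unfold pvLoadA
  rw [hget, pvVal_getD]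

theorem pvKeys_modify_of_mem (mem : PySem.Dict String (List String)) (sl : String)
    (f : List String → List String) (hsl : sl ∈ mem.keys) :
    (mem.modify sl [] f).keys = mem.keys := by
  have hc : mem.contains sl = true := (PySem.Dict.contains_iff_mem_keys _ _).mpr hsl
  simp only [PySem.Dict.modify, PySem.Dict.insert, hc, if_pos]
  simp only [PySem.Dict.keys, List.map_map]
  refine List.map_congr_left (fun p _ => ?_)
  by_cases he : p.1 = sl <;> simp [he]

-- folding fresh inserts appends the items
theorem pvFoldl_insert_fresh {β γ : Type} (l : List (String × γ)) (F : String × γ → β) :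
    ∀ (d : PySem.Dict String β), (∀ p ∈ l, d.contains p.1 = false) → (l.map Prod.fst).Nodup →
    l.foldl (fun acc p => acc.insert p.1 (F p)) d
      = PySem.Dict.mk (d.items ++ l.map (fun p => (p.1, F p))) := by
  induction l with
  | nil => intro d _ _; simp
  | cons a t ih =>
    intro d hfree hnd
    simp only [List.map_cons, List.nodup_cons] at hnd
    have hins : d.insert a.1 (F a) = PySem.Dict.mk (d.items ++ [(a.1, F a)]) := by
      simp [PySem.Dict.insert, hfree a (List.mem_cons_self)]
    have hfree' : ∀ p ∈ t, (d.insert a.1 (F a)).contains p.1 = false := by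
      intro p hp
      rw [hins, PySem.Dict.contains]
      simp only [List.any_append, Bool.or_eq_false_iff]
      refine ⟨?_, ?_⟩
      · have := hfree p (List.mem_cons_of_mem _ hp)
        rwa [PySem.Dict.contains] at this
      · simp only [List.any_cons, List.any_nil, Bool.or_false]
        exact beq_eq_false_iff_ne.mpr
          (fun he => hnd.1 (by rw [he]; exact List.mem_map_of_mem hp))
    simp only [List.foldl_cons]
    rw [ih _ hfree' hnd.2, hins]
    simp

theorem pvFoldl_insert_const (ks : List String) (hnd : ks.Nodup) :
    ks.foldl (fun acc k => acc.insert k ([] : List String)) PySem.Dict.empty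
      = PySem.Dict.mk (ks.map (fun k => (k, ([] : List String)))) := by
  have h := pvFoldl_insert_fresh (l := ks.map (fun k => (k, ())))
    (F := fun _ => ([] : List String)) PySem.Dict.empty (fun _ _ => rfl) ?_
  · have h2 : (ks.map (fun k => (k, ()))).foldl
        (fun acc p => acc.insert p.1 ([] : List String)) PySem.Dict.empty
        = ks.foldl (fun acc k => acc.insert k ([] : List String)) PySem.Dict.empty := by
      rw [List.foldl_map]
    rw [← h2, h]
    simp [PySem.Dict.empty, List.map_map, Function.comp_def]
  · simpa [List.map_map, Function.comp_def] using hnd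

theorem pvMembers0_eq (lsD : PySem.Dict String String) (hnd : lsD.keys.Nodup) :
    pvMembers0 lsD = PySem.Dict.mk (lsD.keys.map (fun k => (k, ([] : List String)))) :=
  pvFoldl_insert_const _ hnd

theorem pvMembers0_keys (lsD : PySem.Dict String String) (hnd : lsD.keys.Nodup) :
    (pvMembers0 lsD).keys = lsD.keys := by
  rw [pvMembers0_eq lsD hnd]
  simp [PySem.Dict.keys, List.map_map]

theorem pvMembers0_getD (lsD : PySem.Dict String String) (hnd : lsD.keys.Nodup) (k : String) :
    (pvMembers0 lsD).getD k [] = [] := by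
  rw [pvMembers0_eq lsD hnd, PySem.Dict.getD, PySem.Dict.get?]
  cases hf : (lsD.keys.map (fun k => (k, ([] : List String)))).find? (fun p => p.1 == k) with
  | none => rfl
  | some q =>
    have hq := List.mem_of_find?_eq_some hf
    rcases List.mem_map.mp hq with ⟨k', _, rfl⟩
    rfl

theorem pvInitA_eq_nest (lsD : PySem.Dict String String) (hnd : lsD.keys.Nodup) :
    pvInitA lsD = pvNest lsD (pvMembers0 lsD) := by
  unfold pvInitA
  rw [pvFoldl_insert_fresh lsD.items
    (F := fun p => PySem.Dict.ofList [("leader_ids", PySem.Set.ofList [p.2]), ("student_ids", ([] : List String))])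
    PySem.Dict.empty (fun _ _ => rfl) hnd]
  unfold pvNest
  congr 1
  simp only [PySem.Dict.empty, List.nil_append]
  refine List.map_congr_left (fun p _ => ?_)
  rw [pvMembers0_getD lsD hnd]
  rfl

-- min with two keys that agree on the list
theorem pvMinFold_congr {α : Type} (k1 k2 : α → Nat) :
    ∀ (t : List α) (acc : Option α), (∀ x ∈ t, k1 x = k2 x) → (∀ a, acc = some a → k1 a = k2 a) →
    t.foldl (fun acc x => match acc with
        | none => some x
        | some m => if k1 x < k1 m then some x else some m) acc
      = t.foldl (fun acc x => match acc with
        | none => some x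
        | some m => if k2 x < k2 m then some x else some m) acc := by
  intro t
  induction t with
  | nil => intro acc _ _; rfl
  | cons a t ih =>
    intro acc hmem hacc
    have ha := hmem a List.mem_cons_self
    have ht : ∀ x ∈ t, k1 x = k2 x := fun x hx => hmem x (List.mem_cons_of_mem _ hx)
    simp only [List.foldl_cons]
    cases acc with
    | none =>
      show t.foldl _ (some a) = t.foldl _ (some a)
      exact ih (some a) ht (fun b hb => by cases hb; exact ha)
    | some m =>
      have hm := hacc m rfl
      show t.foldl _ (if k1 a < k1 m then some a else some m)
          = t.foldl _ (if k2 a < k2 m then some a else some m)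
      rw [ha, hm]
      split_ifs with hlt
      · exact ih (some a) ht (fun b hb => by cases hb; exact ha)
      · exact ih (some m) ht (fun b hb => by cases hb; exact hm)

theorem pvMinD_congr {α : Type} (xs : List α) (k1 k2 : α → Nat) (d : α)
    (h : ∀ x ∈ xs, k1 x = k2 x) : PySem.List.minD xs k1 d = PySem.List.minD xs k2 d := by
  unfold PySem.List.minD PySem.List.min?
  exact congrArg (fun o => o.getD d) (pvMinFold_congr k1 k2 xs none h (fun a ha => by cases ha))

-- the simulation: A's greedy fold over the nested state tracks B's pvAssign over the flat state
theorem pvAssign_sim (lsD : PySem.Dict String String) (hnd : lsD.keys.Nodup) :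
    ∀ (l : List (String × List String)) (mem : PySem.Dict String (List String))
      (conf : PySem.Set String),
      mem.keys = lsD.keys →
      (∀ p ∈ l, ∀ s ∈ p.2, s ∈ lsD.keys) →
      l.foldl pvGreedyA (pvNest lsD mem, conf)
        = (pvNest lsD (pvAssign (mem, conf) l).1, (pvAssign (mem, conf) l).2) := by
  intro l
  induction l with
  | nil => intro mem conf _ _; rfl
  | cons p rest ih =>
    intro mem conf hkeys hsub
    have hsubr : ∀ q ∈ rest, ∀ s ∈ q.2, s ∈ lsD.keys :=
      fun q hq => hsub q (List.mem_cons_of_mem _ hq)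
    obtain ⟨sid, slots⟩ := p
    cases slots with
    | nil =>
      simp only [List.foldl_cons, pvGreedyA, List.length_nil, if_pos, pvAssign]
      exact ih mem (PySem.Set.add conf sid) hkeys hsubr
    | cons s t =>
      have hsl : ∀ x ∈ s :: t, x ∈ lsD.keys := fun x hx => hsub (sid, s :: t) List.mem_cons_self x hx
      have hkey : ∀ x ∈ s :: t, pvLoadA (pvNest lsD mem) x = (mem.getD x []).length :=
        fun x hx => pvLoad_nest lsD hnd mem x (hsl x hx)
      have hminEq : PySem.List.minD (s :: t) (fun slot => pvLoadA (pvNest lsD mem) slot) ""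
          = PySem.List.minD (s :: t) (fun sl => (mem.getD sl []).length) "" :=
        pvMinD_congr _ _ _ _ hkey
      set sl0 : String := PySem.List.minD (s :: t) (fun sl => (mem.getD sl []).length) "" with hsl0
      have hsl0mem : sl0 ∈ s :: t := PySem.List.minD_mem _ _ _ (by simp)
      have hsl0keys : sl0 ∈ lsD.keys := hsl (sl0) hsl0mem
      have hplace : pvPlaceA (pvNest lsD mem) sl0 sid
          = pvNest lsD (mem.modify sl0 [] (fun m => PySem.Set.add m sid)) :=
        pvPlace_nest lsD hnd mem sl0 sid hsl0keys
      have hkeys' : (mem.modify sl0 [] (fun m => PySem.Set.add m sid)).keys = lsD.keys := by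
        rw [pvKeys_modify_of_mem mem sl0 _ (hkeys ▸ hsl0keys), hkeys]
      have hstep : pvGreedyA (pvNest lsD mem, conf) (sid, s :: t)
          = (pvNest lsD (mem.modify sl0 [] (fun m => PySem.Set.add m sid)), conf) := by
        cases t with
        | nil =>
          have hss : sl0 = s := by rw [hsl0]; rfl
          simp only [pvGreedyA, List.length_cons, List.length_nil]
          rw [if_pos trivial]
          simp only [List.headD_cons]
          rw [← hss, hplace, if_neg (by omega)]
        | cons s2 t2 =>
          simp only [pvGreedyA, List.length_cons]
          rw [if_neg (by omega), if_neg (by omega)]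
          rw [hminEq, hplace]
      simp only [List.foldl_cons]
      rw [hstep]
      have hassign : pvAssign (mem, conf) ((sid, s :: t) :: rest)
          = pvAssign (mem.modify sl0 [] (fun m => PySem.Set.add m sid), conf) rest := by
        simp only [pvAssign, hsl0]
      rw [hassign]
      exact ih _ conf hkeys' hsubr

-- A's appended slots list is the filtered key list B uses
theorem pvSlotsA_eq_filter (atD : PySem.Dict String (PySem.Dict String (List String)))
    (lsD : PySem.Dict String String) (sid : String) :
    pvSlotsA atD lsD sid = pvSlotsB atD lsD sid := by
  unfold pvSlotsA pvSlotsB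
  rw [PySem.List.foldl_append_if (p := fun slot => pvHas atD slot sid) (f := fun slot => slot)]
  simp

-- A's full build = B's counting-free rebuild of the winner
theorem pvBuildA_eq_runB (atD : PySem.Dict String (PySem.Dict String (List String)))
    (student_ids : List String) (lsD : PySem.Dict String String) (hnd : lsD.keys.Nodup) :
    pvBuildA atD student_ids lsD
      = (pvNest lsD (pvRunB atD student_ids lsD).1, (pvRunB atD student_ids lsD).2) := by
  unfold pvBuildA pvRunB
  have hsiws : student_ids.foldl (fun acc sid => acc ++ [(sid, pvSlotsA atD lsD sid)]) []
      = student_ids.map (fun s => (s, pvSlotsB atD lsD s)) := by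
    rw [PySem.List.foldl_append_singleton_eq_map]
    exact List.map_congr_left (fun sid _ => by rw [pvSlotsA_eq_filter])
  rw [hsiws, pvInitA_eq_nest lsD hnd]
  refine pvAssign_sim lsD hnd _ _ _ (pvMembers0_keys lsD hnd) ?_
  intro p hp s hs
  rw [PySem.List.mem_sorted] at hp
  rcases List.mem_map.mp hp with ⟨sid, _, rfl⟩
  simp only [pvSlotsB] at hs
  exact (List.mem_filter.mp hs).1

-- splitting A's greedy fold: the conflict component is independent of the schedule component
def pvAf (s1 : PySem.Dict String (PySem.Dict String (List String))) (p : String × List String) :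
    PySem.Dict String (PySem.Dict String (List String)) :=
  if p.2.length = 0 then s1
  else if p.2.length = 1 then pvPlaceA s1 (p.2.headD "") p.1
  else pvPlaceA s1 (PySem.List.minD p.2 (fun slot => pvLoadA s1 slot) "") p.1

def pvAg (s : PySem.Set String) (p : String × List String) : PySem.Set String :=
  if p.2.length = 0 then PySem.Set.add s p.1 else s

theorem pvAg_mem (l : List (String × List String)) (s : PySem.Set String) (y : String) :
    y ∈ l.foldl pvAg s ↔ y ∈ s ∨ ∃ p ∈ l, p.2 = [] ∧ y = p.1 := by
  induction l generalizing s with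
  | nil => simp
  | cons q t ih =>
    simp only [List.foldl_cons, ih, pvAg]
    split_ifs with h <;> rw [List.length_eq_zero_iff] at h
    · simp only [PySem.Set.mem_add, List.mem_cons]
      constructor
      · rintro ((hy | hy) | ⟨p, hp, h2, hy⟩)
        · exact Or.inl hy
        · exact Or.inr ⟨q, Or.inl rfl, h, hy⟩
        · exact Or.inr ⟨p, Or.inr hp, h2, hy⟩
      · rintro (hy | ⟨p, (rfl | hp), h2, hy⟩)
        · exact Or.inl (Or.inl hy)
        · exact Or.inl (Or.inr hy)
        · exact Or.inr ⟨p, hp, h2, hy⟩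
    · simp only [List.mem_cons]
      constructor
      · rintro (hy | ⟨p, hp, h2, hy⟩)
        · exact Or.inl hy
        · exact Or.inr ⟨p, Or.inr hp, h2, hy⟩
      · rintro (hy | ⟨p, (rfl | hp), h2, hy⟩)
        · exact Or.inl hy
        · exact absurd h2 h
        · exact Or.inr ⟨p, hp, h2, hy⟩

theorem pvAg_nodup (l : List (String × List String)) (s : PySem.Set String) (h : s.Nodup) :
    (l.foldl pvAg s).Nodup := by
  induction l generalizing s with
  | nil => exact h
  | cons q t ih =>
    simp only [List.foldl_cons, pvAg]
    split_ifs with hq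
    · exact ih _ (PySem.Set.nodup_add _ _ h)
    · exact ih _ h

theorem pvBuildA_snd (atD : PySem.Dict String (PySem.Dict String (List String)))
    (student_ids : List String) (lsD : PySem.Dict String String) :
    (pvBuildA atD student_ids lsD).2 =
      (PySem.List.sorted
        (student_ids.map (fun sid => (sid, pvSlotsA atD lsD sid))) (fun x => x.2.length) false).foldl
        pvAg ([] : PySem.Set String) := by
  unfold pvBuildA
  have hsiws : student_ids.foldl (fun acc sid => acc ++ [(sid, pvSlotsA atD lsD sid)]) []
      = student_ids.map (fun sid => (sid, pvSlotsA atD lsD sid)) := by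
    rw [PySem.List.foldl_append_singleton_eq_map]; simp
  have hg : pvGreedyA = fun st p => (pvAf st.1 p, pvAg st.2 p) := by
    funext st p
    unfold pvGreedyA pvAf pvAg
    split_ifs <;> rfl
  rw [hsiws, hg, PySem.List.foldl_prod_mk (f := pvAf) (g := pvAg)]

-- the conflict-set SIZE of A's build is B's conflict count
theorem pvBuildA_conf_len (atD : PySem.Dict String (PySem.Dict String (List String)))
    (student_ids : List String) (lsD : PySem.Dict String String) :
    (pvBuildA atD student_ids lsD).2.length = pvCount atD student_ids lsD := by
  rw [pvBuildA_snd]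
  have hstuck : ∀ y, ((pvSlotsB atD lsD y).isEmpty = true) ↔ pvSlotsA atD lsD y = [] := by
    intro y
    rw [pvSlotsA_eq_filter, List.isEmpty_iff]
  have hS : (PySem.List.sorted (student_ids.map (fun sid => (sid, pvSlotsA atD lsD sid)))
      (fun x => x.2.length) false).foldl pvAg ([] : PySem.Set String) |>.Nodup :=
    pvAg_nodup _ _ List.nodup_nil
  have hR : (PySem.Set.ofList (student_ids.filter (fun s => (pvSlotsB atD lsD s).isEmpty))).Nodup :=
    PySem.Set.nodup_ofList _
  have hmem : ∀ y, (y ∈ (PySem.List.sorted (student_ids.map (fun sid => (sid, pvSlotsA atD lsD sid)))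
      (fun x => x.2.length) false).foldl pvAg ([] : PySem.Set String)) ↔
      y ∈ PySem.Set.ofList (student_ids.filter (fun s => (pvSlotsB atD lsD s).isEmpty)) := by
    intro y
    rw [pvAg_mem, PySem.Set.mem_ofList]
    simp only [List.mem_filter, List.not_mem_nil, false_or, hstuck]
    constructor
    · rintro ⟨p, hp, hp2, rfl⟩
      rw [PySem.List.mem_sorted] at hp
      rcases List.mem_map.mp hp with ⟨sid, hsid, hpe⟩
      cases hpe
      exact ⟨hsid, hp2⟩
    · rintro ⟨hy, hy2⟩
      exact ⟨(y, pvSlotsA atD lsD y), (PySem.List.mem_sorted _ _ _ _).mpr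
        (List.mem_map.mpr ⟨y, hy, rfl⟩), hy2, rfl⟩
  exact List.Perm.length_eq ((List.perm_ext_iff_of_nodup hS hR).mpr hmem)

-- every candidate dict the loop stores has nodup keys
theorem pvNodup_keys_ofList (ls : List (String × String)) :
    (PySem.Dict.ofList ls).keys.Nodup := by
  have h := PySem.Dict.keys_foldl_insert_key (l := ls) (key := Prod.fst)
    (f := fun _ p => p.2) (d := (PySem.Dict.empty : PySem.Dict String String))
  have he : PySem.Dict.ofList ls
      = ls.foldl (fun d x => d.insert x.1 x.2) PySem.Dict.empty := rfl
  rw [he]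
  have hk : (PySem.Dict.empty : PySem.Dict String String).keys = [] := rfl
  rw [show (fun (d : PySem.Dict String String) (x : String × String) => d.insert x.1 x.2)
      = (fun d x => d.insert x.1 ((fun _ p => p.2) d x)) from rfl, h, hk]
  rw [show PySem.Set.update [] (ls.map Prod.fst) = PySem.Set.ofList (ls.map Prod.fst) from
    (PySem.Set.ofList_eq_foldl _).symm]
  exact PySem.Set.nodup_ofList _

-- A's running best state, as a function of B's running best candidate
def pvAB (atD : PySem.Dict String (PySem.Dict String (List String))) (student_ids : List String)
    (b : Option (PySem.Dict String String)) :
    PySem.Dict String (PySem.Dict String (List String)) × PySem.Set String :=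
  match b with
  | none => (PySem.Dict.empty, PySem.Set.ofList student_ids)
  | some lsD => pvBuildA atD student_ids lsD

-- the outer-loop invariant: A's fold state tracks B's (best candidate, threshold) pair,
-- and every stored candidate has nodup keys
theorem pvLoop_inv (atD : PySem.Dict String (PySem.Dict String (List String)))
    (student_ids : List String) :
    ∀ (l : List (List (String × String))) (b : Option (PySem.Dict String String)) (m : Nat),
      (pvAB atD student_ids b).2.length = m →
      (∀ lsD, b = some lsD → lsD.keys.Nodup) →
      l.foldl (fun fin ls =>
          let t := pvBuildA atD student_ids (PySem.Dict.ofList ls)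
          if t.2.length < fin.2.length then t else fin) (pvAB atD student_ids b)
        = pvAB atD student_ids
            (l.foldl (fun st ls =>
              let c := pvCount atD student_ids (PySem.Dict.ofList ls)
              if c < st.2 then (some (PySem.Dict.ofList ls), c) else st) (b, m)).1 ∧
      (pvAB atD student_ids
            (l.foldl (fun st ls =>
              let c := pvCount atD student_ids (PySem.Dict.ofList ls)
              if c < st.2 then (some (PySem.Dict.ofList ls), c) else st) (b, m)).1).2.length
        = (l.foldl (fun st ls =>
              let c := pvCount atD student_ids (PySem.Dict.ofList ls)
              if c < st.2 then (some (PySem.Dict.ofList ls), c) else st) (b, m)).2 ∧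
      (∀ lsD, (l.foldl (fun st ls =>
              let c := pvCount atD student_ids (PySem.Dict.ofList ls)
              if c < st.2 then (some (PySem.Dict.ofList ls), c) else st) (b, m)).1 = some lsD →
          lsD.keys.Nodup) := by
  intro l
  induction l with
  | nil => exact fun b m h hn => ⟨rfl, h, hn⟩
  | cons ls t ih =>
    intro b m h hn
    simp only [List.foldl_cons]
    by_cases hlt : pvCount atD student_ids (PySem.Dict.ofList ls) < m
    · have hlt' : (pvBuildA atD student_ids (PySem.Dict.ofList ls)).2.length <
          (pvAB atD student_ids b).2.length := by
        rw [pvBuildA_conf_len, h]; exact hlt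
      rw [if_pos hlt', if_pos hlt]
      exact ih (some (PySem.Dict.ofList ls)) _ (pvBuildA_conf_len _ _ _)
        (fun lsD he => by cases he; exact pvNodup_keys_ofList ls)
    · have hlt' : ¬ (pvBuildA atD student_ids (PySem.Dict.ofList ls)).2.length <
          (pvAB atD student_ids b).2.length := by
        rw [pvBuildA_conf_len, h]; exact hlt
      rw [if_neg hlt', if_neg hlt]
      exact ih b m h hn

-- ===== VERDICT (by name: the statement is the Claim_ definition above) =====
theorem fill_students_spec : Claim_equal_fill_students := by
  intro availability_table student_ids leader_schedules _ _
  simp only [Spec_fill_students, fill_students, fill_students_alt]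
  obtain ⟨h1, _, h3⟩ := pvLoop_inv (pvAvail availability_table) student_ids leader_schedules none
    ((PySem.Set.ofList student_ids).length) rfl (fun _ h => by cases h)
  have e : ((PySem.Dict.empty : PySem.Dict String (PySem.Dict String (List String))),
      PySem.Set.ofList student_ids) = pvAB (pvAvail availability_table) student_ids none := rfl
  rw [e, h1]
  cases hb : (leader_schedules.foldl (fun st ls =>
      let c := pvCount (pvAvail availability_table) student_ids (PySem.Dict.ofList ls)
      if c < st.2 then (some (PySem.Dict.ofList ls), c) else st)
      ((none : Option (PySem.Dict String String)), (PySem.Set.ofList student_ids).length)).1 with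
  | none => rfl
  | some lsD =>
      have hnd : lsD.keys.Nodup := h3 lsD hb
      simp only [pvAB, pvBuildA_eq_runB _ _ _ hnd]
      refine Prod.ext ?_ rfl
      simp only [pvNest, List.map_map]
      exact List.map_congr_left (fun p _ => by rw [Function.comp_apply, pvVal_items])
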